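-- pv_equiv track=rewrite | github.com/ShundaZhang/CTF | CyberApocalypse2023/misc/CrossBridge/test.py | find_crossing_strategy
-- ===== SOURCE A (Python) =====
-- def find_crossing_strategy(times, flashlight_charge):
--     # Create a list of tuples, where each tuple represents a person and their time to cross
--     people = [(i+1, times[i]) for i in range(len(times))]
--     # Sort the people list by their time to cross
--     people.sort(key=lambda x: x[1])
--     # Initialize the strategy list
--     strategy = []
--     # While there are still people on the starting side of the bridge
--     while len(people) > 0:
--         # If there is only one person left, they must cross alone
--         if len(people) == 1:
--             strategy.append([people[0][0]])
--             people = []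
--         # If there are two people left, they can cross together
--         elif len(people) == 2:
--             strategy.append([people[0][0], people[1][0]])
--             people = []
--         else:
--             # If there are three or more people left, select the two fastest people who can cross together
--             fastest = people[:2]
--             for i in range(2, len(people)):
--                 if people[i][1] - fastest[0][1] < flashlight_charge:
--                     fastest.append(people[i])
--                 else:
--                     break
--             # Remove the selected people from the people list
--             for person in fastest:
--                 people.remove(person)
--             # Determine who needs to come back with the flashlight
--             if len(fastest) == 2:
--                 # If two people crossed, the faster one must come back
--                 return_person = fastest[0]
--             else:
--                 # If only one person crossed, they must come back
--                 return_person = fastest[0]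
--             # Append the crossing and returning pairs to the strategy list
--             strategy.append([fastest[0][0], fastest[1][0]])
--             strategy.append([return_person[0]])
--     return strategy
-- ===== SOURCE B (Python) =====
-- def find_crossing_strategy(times, flashlight_charge):
--     # Sort once; then advance an index pointer over contiguous batches
--     # instead of rebuilding/scanning the list with list.remove.
--     people = sorted(enumerate(times, 1), key=lambda p: p[1])
--     ids = [p[0] for p in people]
--     ts = [p[1] for p in people]
--     n = len(times)
--     p = 0
--     strategy = []
--     while n - p >= 3:
--         k = 2
--         while p + k < n and ts[p + k] - ts[p] < flashlight_charge:
--             k += 1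
--         strategy.append([ids[p], ids[p + 1]])
--         strategy.append([ids[p]])
--         p += k
--     if n - p == 1:
--         strategy.append([ids[p]])
--     elif n - p == 2:
--         strategy.append([ids[p], ids[p + 1]])
--     return strategy
-- ===== Notes on version B (the rewrite author's own statement) =====
-- stated objective: faster
-- what changed: Sort once and advance an index pointer over contiguous prefix batches of the sorted array, instead of re-scanning and shifting the list with an inner fastest-collection pass and repeated list.remove calls.
import Mathlib
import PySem

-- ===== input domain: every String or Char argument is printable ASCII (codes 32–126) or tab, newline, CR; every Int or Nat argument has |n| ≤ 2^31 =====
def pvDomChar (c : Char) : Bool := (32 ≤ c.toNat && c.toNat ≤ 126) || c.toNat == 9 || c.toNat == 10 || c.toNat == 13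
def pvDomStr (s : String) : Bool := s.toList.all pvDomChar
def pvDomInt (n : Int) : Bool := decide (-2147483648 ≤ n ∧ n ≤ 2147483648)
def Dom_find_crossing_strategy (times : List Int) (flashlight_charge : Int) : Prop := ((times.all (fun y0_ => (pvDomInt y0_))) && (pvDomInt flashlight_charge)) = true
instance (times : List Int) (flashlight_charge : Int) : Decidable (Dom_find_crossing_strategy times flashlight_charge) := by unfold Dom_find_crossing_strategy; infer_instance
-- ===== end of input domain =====

-- B sorts once and advances an index pointer over contiguous batches of the sorted array,
-- instead of A's inner fastest-collection pass plus repeated list.remove (objective: faster).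

-- ===== PORT A =====
def pvGoFastest (people : List (Int × Int)) (flashlight_charge : Int) (i : Nat)
    (fastest : List (Int × Int)) : List (Int × Int) :=
  if _h : i < people.length then
    if (PySem.List.pyGetD people ((i : Nat) : Int) (0, 0)).2
        - (PySem.List.pyGetD fastest 0 (0, 0)).2 < flashlight_charge then
      pvGoFastest people flashlight_charge (i + 1)
        (fastest ++ [PySem.List.pyGetD people ((i : Nat) : Int) (0, 0)])
    else fastest
  else fastest
termination_by people.length - i

def pvLoopA (flashlight_charge : Int) : Nat → List (Int × Int) → List (List Int) → List (List Int)
  | 0, _, strategy => strategy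
  | fuel + 1, people, strategy =>
    if people.length = 0 then strategy
    else if people.length = 1 then
      strategy ++ [[(PySem.List.pyGetD people 0 (0, 0)).1]]
    else if people.length = 2 then
      strategy ++ [[(PySem.List.pyGetD people 0 (0, 0)).1, (PySem.List.pyGetD people 1 (0, 0)).1]]
    else
      let fastest := pvGoFastest people flashlight_charge 2 (PySem.List.slice people none (some 2))
      let people' := fastest.foldl (fun ps person => (PySem.List.remove? ps person).getD ps) people
      pvLoopA flashlight_charge fuel people'
        (strategy ++ [[(PySem.List.pyGetD fastest 0 (0, 0)).1, (PySem.List.pyGetD fastest 1 (0, 0)).1]]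
          ++ [[(PySem.List.pyGetD fastest 0 (0, 0)).1]])

def find_crossing_strategy (times : List Int) (flashlight_charge : Int) : List (List Int) :=
  let people0 := (PySem.List.pyRange 0 times.length 1).map
      (fun i => (i + 1, PySem.List.pyGetD times i 0))
  let people := PySem.List.sorted people0 (fun x => x.2) false
  pvLoopA flashlight_charge (people.length + 1) people []

-- ===== PORT B =====
def pvInnerK (ts : List Int) (flashlight_charge : Int) (p k : Nat) : Nat :=
  if _h : p + k < ts.length then
    if PySem.List.pyGetD ts ((p + k : Nat) : Int) 0 - PySem.List.pyGetD ts ((p : Nat) : Int) 0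
        < flashlight_charge then
      pvInnerK ts flashlight_charge p (k + 1)
    else k
  else k
termination_by ts.length - (p + k)

def pvLoopB (ids : List Int) (ts : List Int) (flashlight_charge : Int) :
    Nat → Nat → List (List Int) → List (List Int)
  | 0, _, strategy => strategy
  | fuel + 1, p, strategy =>
    if 3 ≤ ts.length - p then
      let k := pvInnerK ts flashlight_charge p 2
      pvLoopB ids ts flashlight_charge fuel (p + k)
        (strategy ++ [[PySem.List.pyGetD ids ((p : Nat) : Int) 0,
                       PySem.List.pyGetD ids ((p + 1 : Nat) : Int) 0],
                      [PySem.List.pyGetD ids ((p : Nat) : Int) 0]])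
    else if ts.length - p = 1 then
      strategy ++ [[PySem.List.pyGetD ids ((p : Nat) : Int) 0]]
    else if ts.length - p = 2 then
      strategy ++ [[PySem.List.pyGetD ids ((p : Nat) : Int) 0,
                    PySem.List.pyGetD ids ((p + 1 : Nat) : Int) 0]]
    else strategy

def find_crossing_strategy_alt (times : List Int) (flashlight_charge : Int) : List (List Int) :=
  let people := PySem.List.sorted (PySem.List.enumerate times 1) (fun p => p.2) false
  let ids := people.map (fun p => p.1)
  let ts := people.map (fun p => p.2)
  pvLoopB ids ts flashlight_charge (times.length + 1) 0 []

-- ===== PRECONDITION & SPEC =====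
def Spec_find_crossing_strategy (times : List Int) (flashlight_charge : Int) (out : List (List Int)) : Prop := out = find_crossing_strategy_alt times flashlight_charge
instance (times : List Int) (flashlight_charge : Int) (out : List (List Int)) : Decidable (Spec_find_crossing_strategy times flashlight_charge out) := by unfold Spec_find_crossing_strategy; infer_instance

-- ===== CLAIM (what is proved, stated in full; the proofs are below) =====
def Claim_equal_find_crossing_strategy : Prop := ∀ (times : List Int) (flashlight_charge : Int), Dom_find_crossing_strategy times flashlight_charge → Spec_find_crossing_strategy times flashlight_charge (find_crossing_strategy times flashlight_charge)

-- ===== LEMMAS AND PROOFS =====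

lemma pv_people0_eq (times : List Int) :
    (PySem.List.pyRange 0 times.length 1).map (fun i => (i + 1, PySem.List.pyGetD times i 0))
      = PySem.List.enumerate times 1 := by
  apply List.ext_getElem?
  intro k
  by_cases hk : k < times.length
  · rw [PySem.List.getElem?_map_pyRange_zero _ _ _ hk, PySem.List.getElem?_enumerate]
    simp [hk, add_comm]
  · have h1 : ((PySem.List.pyRange 0 times.length 1).map
        (fun i => (i + 1, PySem.List.pyGetD times i 0))).length = times.length := by
      simp [PySem.List.length_pyRange_one]
    have h2 : (PySem.List.enumerate times 1).length = times.length := by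
      simp [PySem.List.length_enumerate]
    rw [List.getElem?_eq_none (by omega), List.getElem?_eq_none (by omega)]

lemma pvGoFastest_eq (people : List (Int × Int)) (c : Int) (f0 : Int × Int) :
    ∀ (n i : Nat) (fs : List (Int × Int)), people.length - i ≤ n →
      pvGoFastest people c i (f0 :: fs)
        = (f0 :: fs) ++ (people.drop i).takeWhile (fun x => decide (x.2 - f0.2 < c)) := by
  intro n
  induction n with
  | zero =>
    intro i fs h
    have hle : people.length ≤ i := by omega
    unfold pvGoFastest
    rw [dif_neg (by omega)]
    simp [List.drop_eq_nil_of_le hle]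
  | succ n ih =>
    intro i fs h
    unfold pvGoFastest
    by_cases hi : i < people.length
    · rw [dif_pos hi]
      have hget : PySem.List.pyGetD people ((i : Nat) : Int) (0, 0) = people[i] := by
        simp [List.getD_eq_getElem?_getD, List.getElem?_eq_getElem hi]
      have hf0 : PySem.List.pyGetD (f0 :: fs) 0 (0, 0) = f0 := by
        simp [PySem.List.pyGetD_zero_cons]
      have hdrop : people.drop i = people[i] :: people.drop (i + 1) :=
        List.drop_eq_getElem_cons hi
      rw [hget, hf0]
      by_cases hc : people[i].2 - f0.2 < c
      · rw [if_pos hc]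
        have hcons : (f0 :: fs) ++ [people[i]] = f0 :: (fs ++ [people[i]]) := by simp
        have hdec : (decide (people[i].2 - f0.2 < c)) = true := decide_eq_true hc
        rw [hcons, ih (i + 1) (fs ++ [people[i]]) (by omega), hdrop, List.takeWhile_cons, hdec]
        simp
      · have hdec : (decide (people[i].2 - f0.2 < c)) = false := decide_eq_false hc
        rw [if_neg hc, hdrop, List.takeWhile_cons, hdec]
        simp
    · rw [dif_neg hi]
      have hnil : people.drop i = [] := List.drop_eq_nil_of_le (Nat.le_of_not_lt hi)
      rw [hnil]
      simp

lemma pvInnerK_eq (ts : List Int) (c : Int) (p : Nat) :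
    ∀ (n k : Nat), ts.length - (p + k) ≤ n →
      pvInnerK ts c p k
        = k + ((ts.drop (p + k)).takeWhile (fun t => decide (t - ts.getD p 0 < c))).length := by
  intro n
  induction n with
  | zero =>
    intro k h
    have hle : ts.length ≤ p + k := by omega
    unfold pvInnerK
    rw [dif_neg (by omega)]
    simp [List.drop_eq_nil_of_le hle]
  | succ n ih =>
    intro k h
    unfold pvInnerK
    by_cases hi : p + k < ts.length
    · rw [dif_pos hi]
      have hget : PySem.List.pyGetD ts ((p + k : Nat) : Int) 0 = ts[p + k] := by
        rw [PySem.List.pyGetD_natCast]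
        simp [List.getD_eq_getElem?_getD, List.getElem?_eq_getElem hi]
      have hgp : PySem.List.pyGetD ts ((p : Nat) : Int) 0 = ts.getD p 0 := by simp
      have hdrop : ts.drop (p + k) = ts[p + k] :: ts.drop (p + k + 1) :=
        List.drop_eq_getElem_cons hi
      rw [hget, hgp]
      by_cases hc : ts[p + k] - ts.getD p 0 < c
      · rw [if_pos hc]
        have hdec : (decide (ts[p + k] - ts.getD p 0 < c)) = true := decide_eq_true hc
        rw [ih (k + 1) (by omega), hdrop, List.takeWhile_cons, hdec]
        have e : p + (k + 1) = p + k + 1 := by omega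
        rw [e]
        simp
        omega
      · have hdec : (decide (ts[p + k] - ts.getD p 0 < c)) = false := decide_eq_false hc
        rw [if_neg hc, hdrop, List.takeWhile_cons, hdec]
        simp
    · rw [dif_neg hi]
      have hnil : ts.drop (p + k) = [] := List.drop_eq_nil_of_le (Nat.le_of_not_lt hi)
      rw [hnil]
      simp

lemma pv_remove_prefix (suf : List (Int × Int)) :
    ∀ pre : List (Int × Int),
      pre.foldl (fun ps person => (PySem.List.remove? ps person).getD ps) (pre ++ suf) = suf := by
  intro pre
  induction pre with
  | nil => simp
  | cons x pre' ih =>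
    rw [List.cons_append, List.foldl_cons, PySem.List.remove?_cons_self]
    simpa using ih

lemma pv_getD_of_drop_cons {β : Type} [Inhabited β] (s : List (Int × Int)) (f : Int × Int → β)
    (p : Nat) (x : Int × Int) (tl : List (Int × Int)) (h : s.drop p = x :: tl) (d : β) :
    (s.map f).getD p d = f x := by
  have hx : s[p]? = some x := by
    have h2 : (List.drop p s)[0]? = s[p + 0]? := List.getElem?_drop
    rw [h] at h2
    simpa using h2.symm
  simp [List.getD_eq_getElem?_getD, hx]

lemma pv_pyGetD_of_drop_cons (s : List (Int × Int)) (f : Int × Int → Int)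
    (p : Nat) (x : Int × Int) (tl : List (Int × Int)) (h : s.drop p = x :: tl) :
    PySem.List.pyGetD (s.map f) ((p : Nat) : Int) 0 = f x := by
  rw [PySem.List.pyGetD_natCast]
  exact pv_getD_of_drop_cons s f p x tl h 0

lemma pv_loop_eq (s : List (Int × Int)) (c : Int) :
    ∀ (m p : Nat) (strat : List (List Int)) (fuelA fuelB : Nat),
      s.length - p ≤ m → s.length - p + 1 ≤ fuelA → s.length - p + 1 ≤ fuelB →
      pvLoopA c fuelA (s.drop p) strat
        = pvLoopB (s.map (fun x => x.1)) (s.map (fun x => x.2)) c fuelB p strat := by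
  intro m
  induction m using Nat.strong_induction_on with
  | _ m ih =>
  intro p strat fuelA fuelB hm hfa hfb
  obtain ⟨fa, rfl⟩ : ∃ fa, fuelA = fa + 1 := ⟨fuelA - 1, by omega⟩
  obtain ⟨fb, rfl⟩ : ∃ fb, fuelB = fb + 1 := ⟨fuelB - 1, by omega⟩
  have hdl : (s.drop p).length = s.length - p := List.length_drop
  have hil : (s.map (fun x => x.1)).length = s.length := by simp
  have htl : (s.map (fun x => x.2)).length = s.length := by simp
  simp only [pvLoopA, pvLoopB]
  by_cases h3 : 3 ≤ s.length - p
  · -- main batch case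
    obtain ⟨a, rest1, ha⟩ : ∃ a rest1, s.drop p = a :: rest1 := by
      cases hsd : s.drop p with
      | nil => rw [hsd] at hdl; simp at hdl; omega
      | cons a r => exact ⟨a, r, rfl⟩
    obtain ⟨b, rr, hb⟩ : ∃ b rr, rest1 = b :: rr := by
      cases hr : rest1 with
      | nil => rw [hr] at ha; rw [ha] at hdl; simp at hdl; omega
      | cons b r => exact ⟨b, r, rfl⟩
    have hd : s.drop p = a :: b :: rr := by rw [ha, hb]
    have hrr : s.drop (p + 2) = rr := by
      have e : s.drop (p + 2) = (s.drop p).drop 2 := by rw [List.drop_drop]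
      rw [e, hd]
      rfl
    rw [if_neg (show ¬(s.drop p).length = 0 by rw [hdl]; omega),
        if_neg (show ¬(s.drop p).length = 1 by rw [hdl]; omega),
        if_neg (show ¬(s.drop p).length = 2 by rw [hdl]; omega),
        if_pos (show 3 ≤ (s.map (fun x => x.2)).length - p by rw [htl]; omega)]
    have hslice : PySem.List.slice (s.drop p) none (some 2) = a :: [b] := by
      rw [PySem.List.slice_to, hd]
      · rfl
      · norm_num
    set P : Int × Int → Bool := fun x => decide (x.2 - a.2 < c) with hP
    set w : List (Int × Int) := rr.takeWhile P with hw
    have hfast : pvGoFastest (s.drop p) c 2 (PySem.List.slice (s.drop p) none (some 2))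
        = a :: b :: w := by
      rw [hslice, pvGoFastest_eq (s.drop p) c a ((s.drop p).length) 2 [b] (by omega)]
      rw [show (s.drop p).drop 2 = rr by rw [hd]; rfl]
      simp [hw, hP]
    have hsplit : s.drop p = (a :: b :: w) ++ rr.dropWhile P := by
      rw [hd]
      simp [hw, List.takeWhile_append_dropWhile]
    have hrem : (a :: b :: w).foldl (fun ps person => (PySem.List.remove? ps person).getD ps)
        (s.drop p) = rr.dropWhile P := by
      rw [hsplit]
      exact pv_remove_prefix (rr.dropWhile P) (a :: b :: w)
    have hdropk : rr.dropWhile P = s.drop (p + (2 + w.length)) := by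
      have h1 : s.drop (p + (2 + w.length)) = rr.drop w.length := by
        rw [← hrr, List.drop_drop]
        congr 1
        omega
      rw [h1]
      conv_rhs => rw [← List.takeWhile_append_dropWhile (p := P) (l := rr)]
      rw [← hw, List.drop_left]
    have hgetDp : (s.map (fun x => x.2)).getD p 0 = a.2 :=
      pv_getD_of_drop_cons s (fun x => x.2) p a (b :: rr) hd 0
    have hpred : ((fun t => decide (t - a.2 < c)) ∘ (fun x : Int × Int => x.2)) = P := by
      funext x
      simp [hP, Function.comp]
    have hkB : pvInnerK (s.map (fun x => x.2)) c p 2 = 2 + w.length := by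
      rw [pvInnerK_eq (s.map (fun x => x.2)) c p ((s.map (fun x => x.2)).length) 2 (by omega)]
      rw [hgetDp]
      have hdm : (s.map (fun x => x.2)).drop (p + 2) = rr.map (fun x => x.2) := by
        rw [← List.map_drop, hrr]
      rw [hdm, List.takeWhile_map, hpred, ← hw]
      simp
    have hida : PySem.List.pyGetD (s.map (fun x => x.1)) ((p : Nat) : Int) 0 = a.1 :=
      pv_pyGetD_of_drop_cons s (fun x => x.1) p a (b :: rr) hd
    have hidb : PySem.List.pyGetD (s.map (fun x => x.1)) ((p + 1 : Nat) : Int) 0 = b.1 := by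
      apply pv_pyGetD_of_drop_cons s (fun x => x.1) (p + 1) b rr
      have e : s.drop (p + 1) = (s.drop p).drop 1 := by rw [List.drop_drop]
      rw [e, hd]
      rfl
    have hfa0 : PySem.List.pyGetD (a :: b :: w) 0 ((0 : Int), (0 : Int)) = a := by
      simp [PySem.List.pyGetD_zero_cons]
    have hfa1 : PySem.List.pyGetD (a :: b :: w) 1 ((0 : Int), (0 : Int)) = b := by
      simp [PySem.List.pyGetD_ofNat']
    simp only [hfast, hrem, hdropk, hkB, hida, hidb, hfa0, hfa1]
    have happ : strat ++ [[a.1, b.1]] ++ [[a.1]] = strat ++ [[a.1, b.1], [a.1]] := by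
      rw [List.append_assoc]
      rfl
    rw [happ]
    exact ih (s.length - (p + (2 + w.length))) (by omega) (p + (2 + w.length)) _ fa fb
      (by omega) (by omega) (by omega)
  · -- tail cases: fewer than three people left
    rw [if_neg (show ¬3 ≤ (s.map (fun x => x.2)).length - p by rw [htl]; omega)]
    by_cases h0 : s.length - p = 0
    · rw [List.drop_eq_nil_of_le (by omega)]
      rw [if_pos (show ([] : List (Int × Int)).length = 0 from rfl),
          if_neg (show ¬(s.map (fun x => x.2)).length - p = 1 by rw [htl]; omega),
          if_neg (show ¬(s.map (fun x => x.2)).length - p = 2 by rw [htl]; omega)]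
    · by_cases h1 : s.length - p = 1
      · obtain ⟨a, tl, ha⟩ : ∃ a tl, s.drop p = a :: tl := by
          cases hsd : s.drop p with
          | nil => rw [hsd] at hdl; simp at hdl; omega
          | cons a r => exact ⟨a, r, rfl⟩
        have htl0 : tl = [] := by
          rw [ha] at hdl
          simp at hdl
          exact List.eq_nil_of_length_eq_zero (by omega)
        have hd : s.drop p = [a] := by rw [ha, htl0]
        rw [hd]
        rw [if_neg (show ¬([a] : List (Int × Int)).length = 0 by simp),
            if_pos (show ([a] : List (Int × Int)).length = 1 by simp),
            if_pos (show (s.map (fun x => x.2)).length - p = 1 by rw [htl]; omega)]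
        rw [pv_pyGetD_of_drop_cons s (fun x => x.1) p a [] hd]
        rw [show PySem.List.pyGetD [a] 0 ((0 : Int), (0 : Int)) = a from
          PySem.List.pyGetD_zero_cons a [] _]
      · have h2 : s.length - p = 2 := by omega
        obtain ⟨a, tl, ha⟩ : ∃ a tl, s.drop p = a :: tl := by
          cases hsd : s.drop p with
          | nil => rw [hsd] at hdl; simp at hdl; omega
          | cons a r => exact ⟨a, r, rfl⟩
        obtain ⟨b, tl2, hbb⟩ : ∃ b tl2, tl = b :: tl2 := by
          cases hr : tl with
          | nil => rw [hr] at ha; rw [ha] at hdl; simp at hdl; omega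
          | cons b r => exact ⟨b, r, rfl⟩
        have htl0 : tl2 = [] := by
          rw [ha, hbb] at hdl
          simp at hdl
          exact List.eq_nil_of_length_eq_zero (by omega)
        have hd : s.drop p = [a, b] := by rw [ha, hbb, htl0]
        rw [hd]
        rw [if_neg (show ¬([a, b] : List (Int × Int)).length = 0 by simp),
            if_neg (show ¬([a, b] : List (Int × Int)).length = 1 by simp),
            if_pos (show ([a, b] : List (Int × Int)).length = 2 by simp),
            if_neg (show ¬(s.map (fun x => x.2)).length - p = 1 by rw [htl]; omega),
            if_pos (show (s.map (fun x => x.2)).length - p = 2 by rw [htl]; omega)]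
        rw [pv_pyGetD_of_drop_cons s (fun x => x.1) p a [b] hd]
        have hb1 : PySem.List.pyGetD (s.map (fun x => x.1)) ((p + 1 : Nat) : Int) 0 = b.1 := by
          apply pv_pyGetD_of_drop_cons s (fun x => x.1) (p + 1) b []
          have e : s.drop (p + 1) = (s.drop p).drop 1 := by rw [List.drop_drop]
          rw [e, hd]
          rfl
        rw [hb1]
        rw [show PySem.List.pyGetD [a, b] 0 ((0 : Int), (0 : Int)) = a from
          PySem.List.pyGetD_zero_cons a [b] _]
        have hgd1 : PySem.List.pyGetD [a, b] 1 ((0 : Int), (0 : Int)) = b := by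
          simp [PySem.List.pyGetD_ofNat']
        rw [hgd1]

-- ===== VERDICT (by name: the statement is the Claim_ definition above) =====
theorem find_crossing_strategy_spec : Claim_equal_find_crossing_strategy := by
  intro times c _
  unfold Spec_find_crossing_strategy find_crossing_strategy find_crossing_strategy_alt
  rw [pv_people0_eq]
  have hlen : (PySem.List.sorted (PySem.List.enumerate times 1) (fun p => p.2) false).length
      = times.length := by
    rw [PySem.List.length_sorted, PySem.List.length_enumerate]
  have := pv_loop_eq (PySem.List.sorted (PySem.List.enumerate times 1) (fun p => p.2) false) c
    (times.length) 0 [] (times.length + 1) (times.length + 1)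
    (by omega) (by omega) (by omega)
  simpa [hlen] using this
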